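-- pv_equiv track=rewrite | github.com/GihanMora/Armitage_project | crawl_n_depth/Simplified_System/Contact_persons_from_website/Extract_Org_Founders.py | extract_person_postion
-- ===== SOURCE A (Python) =====
-- def extract_person_postion(list_sentences, enrich_vocab_list, person_names):
--
--     lst = []
--     for i in range(len(person_names)):
--         for k in range(len(list_sentences)):
--             if person_names[i] in list_sentences[k]:
--                 for j in range(len(enrich_vocab_list)):
--                     if enrich_vocab_list[j] in list_sentences[k].lower():
--                         res = any(person_names[i] in sublist for sublist in lst)
--                         if res == False:
--                             lst.append([person_names[i], enrich_vocab_list[j]])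
--
--     return lst
-- ===== SOURCE B (Python) =====
-- def extract_person_postion(list_sentences, enrich_vocab_list, person_names):
--     # one S x V pass: first matching vocab keyword per sentence (None if no keyword matches)
--     first_kw = [next((v for v in enrich_vocab_list if v in s.lower()), None)
--                 for s in list_sentences]
--     lst = []
--     for name in person_names:
--         if not any(name in sub for sub in lst):
--             hit = next((kw for s, kw in zip(list_sentences, first_kw)
--                         if kw is not None and name in s), None)
--             if hit is not None:
--                 lst.append([name, hit])
--     return lst
-- ===== Notes on version B (the rewrite author's own statement) =====
-- stated objective: faster
-- what changed: Precompute each sentence's first matching vocab keyword in one S*V pass, then for each person take the first sentence containing the name with a non-None keyword, instead of re-scanning the whole vocab against every (person, sentence) pair and re-testing the dedup flag inside the innermost loop.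
import Mathlib
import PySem

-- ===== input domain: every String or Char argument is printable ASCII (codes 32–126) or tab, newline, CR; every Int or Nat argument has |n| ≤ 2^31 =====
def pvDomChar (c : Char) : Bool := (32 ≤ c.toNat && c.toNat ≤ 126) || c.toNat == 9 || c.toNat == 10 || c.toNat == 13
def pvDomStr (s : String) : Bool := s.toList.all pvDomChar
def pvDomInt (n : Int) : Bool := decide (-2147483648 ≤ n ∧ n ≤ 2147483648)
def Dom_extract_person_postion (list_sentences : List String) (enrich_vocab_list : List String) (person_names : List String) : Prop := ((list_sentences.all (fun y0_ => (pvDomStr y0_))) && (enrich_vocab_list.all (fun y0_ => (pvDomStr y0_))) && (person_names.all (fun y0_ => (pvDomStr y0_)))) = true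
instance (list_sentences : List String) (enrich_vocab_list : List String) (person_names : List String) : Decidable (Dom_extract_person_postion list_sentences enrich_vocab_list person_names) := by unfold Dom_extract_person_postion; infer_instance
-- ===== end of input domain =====

-- B precomputes, in one S×V pass, each sentence's first matching vocab keyword, then scans
-- sentences once per person — fewer substring tests than A's triple loop; same return value.

-- ===== PORT A =====
-- literal transliteration: three nested index loops become foldls over the same lists,
-- with the dedup 'any(person in sublist ...)' check re-evaluated inside the innermost loop
def extract_person_postion (list_sentences : List String) (enrich_vocab_list : List String) (person_names : List String) : List (List String) :=
  person_names.foldl (fun lst name =>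
    list_sentences.foldl (fun lst s =>
      if PySem.Str.isIn name s then
        enrich_vocab_list.foldl (fun lst v =>
          if PySem.Str.isIn v (PySem.Str.lower s) then
            if lst.any (fun sub => sub.contains name) then lst
            else lst ++ [[name, v]]
          else lst) lst
      else lst) lst) []

-- ===== PORT B =====
-- transliteration of Source B: first_kw table built once, then one find? per new person
def extract_person_postion_alt (list_sentences : List String) (enrich_vocab_list : List String) (person_names : List String) : List (List String) :=
  let firstKw := list_sentences.map (fun s =>
    enrich_vocab_list.find? (fun v => PySem.Str.isIn v (PySem.Str.lower s)))
  person_names.foldl (fun lst name =>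
    if lst.any (fun sub => sub.contains name) then lst
    else
      match (list_sentences.zip firstKw).find?
          (fun p => p.2.isSome && PySem.Str.isIn name p.1) with
      | some (_, some kw) => lst ++ [[name, kw]]
      | _ => lst) []

-- ===== PRECONDITION & SPEC =====
def Spec_extract_person_postion (list_sentences : List String) (enrich_vocab_list : List String) (person_names : List String) (out : List (List String)) : Prop := out = extract_person_postion_alt list_sentences enrich_vocab_list person_names
instance (list_sentences : List String) (enrich_vocab_list : List String) (person_names : List String) (out : List (List String)) : Decidable (Spec_extract_person_postion list_sentences enrich_vocab_list person_names out) := by unfold Spec_extract_person_postion; infer_instance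

-- ===== CLAIM (what is proved, stated in full; the proofs are below) =====
def Claim_equal_extract_person_postion : Prop := ∀ (list_sentences : List String) (enrich_vocab_list : List String) (person_names : List String), Dom_extract_person_postion list_sentences enrich_vocab_list person_names → Spec_extract_person_postion list_sentences enrich_vocab_list person_names (extract_person_postion list_sentences enrich_vocab_list person_names)

-- ===== LEMMAS AND PROOFS =====

-- 'name already stored': the dedup test A and B share
def pvPresent (lst : List (List String)) (name : String) : Bool :=
  lst.any (fun sub => sub.contains name)

-- A's innermost (vocab) loop leaves lst unchanged when the name is already present
theorem innerA_stuck (name : String) (low : String) (ev : List String)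
    (lst : List (List String)) (h : pvPresent lst name = true) :
    ev.foldl (fun lst v =>
      if PySem.Str.isIn v low then
        if lst.any (fun sub => sub.contains name) then lst else lst ++ [[name, v]]
      else lst) lst = lst := by
  induction ev with
  | nil => rfl
  | cons v tl ih =>
    simp only [List.foldl_cons]
    split_ifs with h1 h2
    · exact ih
    · exact absurd h h2
    · exact ih

-- A's sentence loop leaves lst unchanged when the name is already present
theorem outerA_stuck (name : String) (ev ls : List String)
    (lst : List (List String)) (h : pvPresent lst name = true) :
    ls.foldl (fun lst s =>
      if PySem.Str.isIn name s then
        ev.foldl (fun lst v =>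
          if PySem.Str.isIn v (PySem.Str.lower s) then
            if lst.any (fun sub => sub.contains name) then lst else lst ++ [[name, v]]
          else lst) lst
      else lst) lst = lst := by
  induction ls with
  | nil => rfl
  | cons s tl ih =>
    simp only [List.foldl_cons]
    split_ifs with h1
    · rw [innerA_stuck name (PySem.Str.lower s) ev lst h]; exact ih
    · exact ih

theorem present_append (lst : List (List String)) (name v : String) :
    pvPresent (lst ++ [[name, v]]) name = true := by
  simp [pvPresent, List.any_append]

-- A's vocab loop on a fresh name: appends [name, first matching keyword] if any
theorem innerA_fresh (name : String) (low : String) (ev : List String)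
    (lst : List (List String)) (h : pvPresent lst name = false) :
    ev.foldl (fun lst v =>
      if PySem.Str.isIn v low then
        if lst.any (fun sub => sub.contains name) then lst else lst ++ [[name, v]]
      else lst) lst
    = match ev.find? (fun v => PySem.Str.isIn v low) with
      | some v => lst ++ [[name, v]]
      | none => lst := by
  induction ev with
  | nil => rfl
  | cons v tl ih =>
    simp only [List.foldl_cons, List.find?]
    by_cases hv : PySem.Str.isIn v low = true
    · simp only [hv, if_pos]
      have hp : (lst.any (fun sub => sub.contains name)) = false := h
      rw [hp]
      simp only [Bool.false_eq_true, if_false]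
      rw [innerA_stuck name low tl _ (present_append lst name v)]
    · simp only [hv, if_false, Bool.false_eq_true]
      exact ih

-- A's sentence loop on a fresh name equals B's find? over (sentence, firstKw) pairs
theorem person_step (name : String) (ev ls : List String)
    (lst : List (List String)) (h : pvPresent lst name = false) :
    ls.foldl (fun lst s =>
      if PySem.Str.isIn name s then
        ev.foldl (fun lst v =>
          if PySem.Str.isIn v (PySem.Str.lower s) then
            if lst.any (fun sub => sub.contains name) then lst else lst ++ [[name, v]]
          else lst) lst
      else lst) lst
    = match (ls.zip (ls.map (fun s => ev.find? (fun v => PySem.Str.isIn v (PySem.Str.lower s))))).find?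
          (fun p => p.2.isSome && PySem.Str.isIn name p.1) with
      | some (_, some kw) => lst ++ [[name, kw]]
      | _ => lst := by
  induction ls with
  | nil => rfl
  | cons s tl ih =>
    simp only [List.foldl_cons, List.map_cons, List.zip_cons_cons, List.find?]
    by_cases hs : PySem.Str.isIn name s = true
    · simp only [hs, if_true]
      rw [innerA_fresh name (PySem.Str.lower s) ev lst h]
      cases hkw : ev.find? (fun v => PySem.Str.isIn v (PySem.Str.lower s)) with
      | some kw =>
        simp only [Option.isSome_some, Bool.true_and]
        exact outerA_stuck name ev tl _ (present_append lst name kw)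
      | none =>
        simp only [Option.isSome_none, Bool.false_and]
        exact ih
    · simp only [hs, if_false, Bool.false_eq_true, Bool.and_false]
      exact ih

-- the two person-folds agree from any starting accumulator
theorem fold_persons (ls ev : List String) (pn : List String)
    (lst : List (List String)) :
    pn.foldl (fun lst name =>
      ls.foldl (fun lst s =>
        if PySem.Str.isIn name s then
          ev.foldl (fun lst v =>
            if PySem.Str.isIn v (PySem.Str.lower s) then
              if lst.any (fun sub => sub.contains name) then lst else lst ++ [[name, v]]
            else lst) lst
        else lst) lst) lst
    = pn.foldl (fun lst name =>
        if lst.any (fun sub => sub.contains name) then lst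
        else
          match (ls.zip (ls.map (fun s => ev.find? (fun v => PySem.Str.isIn v (PySem.Str.lower s))))).find?
              (fun p => p.2.isSome && PySem.Str.isIn name p.1) with
          | some (_, some kw) => lst ++ [[name, kw]]
          | _ => lst) lst := by
  induction pn generalizing lst with
  | nil => rfl
  | cons name tl ih =>
    simp only [List.foldl_cons]
    by_cases hp : pvPresent lst name = true
    · rw [outerA_stuck name ev ls lst hp]
      have : (lst.any (fun sub => sub.contains name)) = true := hp
      rw [this]
      simp only [if_true]
      exact ih lst
    · have hf : pvPresent lst name = false := by
        cases hq : pvPresent lst name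
        · rfl
        · exact absurd hq hp
      have : (lst.any (fun sub => sub.contains name)) = false := hf
      rw [this, person_step name ev ls lst hf]
      simp only [Bool.false_eq_true, if_false]
      exact ih _

-- ===== VERDICT (by name: the statement is the Claim_ definition above) =====
theorem extract_person_postion_spec : Claim_equal_extract_person_postion := by
  intro ls ev pn _
  unfold Spec_extract_person_postion extract_person_postion extract_person_postion_alt
  exact fold_persons ls ev pn []
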